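-- pv_equiv track=rewrite | github.com/holiday01/hcc-annotation-benchmark | scripts/16_prepare_gse156625_external.py | fallback_label
-- ===== SOURCE A (Python) =====
-- MARKER_FALLBACK = {
--     "T/NK": {"CD3D", "CD3E", "CD3G", "TRAC", "IL7R", "NKG7", "GNLY", "KLRD1"},
--     "Myeloid": {"LYZ", "CD68", "C1QA", "C1QB", "LST1", "S100A8", "S100A9"},
--     "B": {"MS4A1", "CD79A", "CD79B", "MZB1", "JCHAIN", "IGHG1"},
--     "Hepatocyte": {"ALB", "APOA1", "APOA2", "TTR", "HP", "AFP", "GPC3", "KRT8"},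
--     "Endothelial": {"PECAM1", "VWF", "KDR", "CDH5", "ENG", "PLVAP"},
--     "Fibroblast": {"COL1A1", "COL1A2", "COL3A1", "DCN", "LUM", "ACTA2", "RGS5"},
-- }
--
-- def fallback_label(marker_genes: list[str]) -> str:
--     genes = {g.upper() for g in marker_genes[:50]}
--     scores = {
--         label: len(genes & markers)
--         for label, markers in MARKER_FALLBACK.items()
--     }
--     best_label, best_score = max(scores.items(), key=lambda item: item[1])
--     return best_label if best_score >= 2 else "Unknown"
-- ===== SOURCE B (Python) =====
-- MARKER_FALLBACK = {
--     "T/NK": {"CD3D", "CD3E", "CD3G", "TRAC", "IL7R", "NKG7", "GNLY", "KLRD1"},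
--     "Myeloid": {"LYZ", "CD68", "C1QA", "C1QB", "LST1", "S100A8", "S100A9"},
--     "B": {"MS4A1", "CD79A", "CD79B", "MZB1", "JCHAIN", "IGHG1"},
--     "Hepatocyte": {"ALB", "APOA1", "APOA2", "TTR", "HP", "AFP", "GPC3", "KRT8"},
--     "Endothelial": {"PECAM1", "VWF", "KDR", "CDH5", "ENG", "PLVAP"},
--     "Fibroblast": {"COL1A1", "COL1A2", "COL3A1", "DCN", "LUM", "ACTA2", "RGS5"},
-- }
--
-- # Inverted index, built once: marker gene -> its (unique) label.
-- _GENE_TO_LABEL = {}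
-- for _label, _markers in MARKER_FALLBACK.items():
--     for _g in _markers:
--         _GENE_TO_LABEL[_g] = _label
--
--
-- def fallback_label(marker_genes: list[str]) -> str:
--     unique = list(dict.fromkeys(g.upper() for g in marker_genes[:50]))
--     counts = {label: 0 for label in MARKER_FALLBACK}
--     for g in unique:
--         label = _GENE_TO_LABEL.get(g)
--         if label is not None:
--             counts[label] += 1
--     best_label, best = "Unknown", -1
--     for label, c in counts.items():
--         if c > best:
--             best_label, best = label, c
--     return best_label if best >= 2 else "Unknown"
-- ===== Notes on version B (the rewrite author's own statement) =====
-- stated objective: alternative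
-- what changed: Replaces the six per-label set intersections with an inverted index (gene -> label) built once from MARKER_FALLBACK, then counts labels in a single pass over the deduplicated uppercased genes and takes the first maximum by an explicit running-max scan.
import Mathlib
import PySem

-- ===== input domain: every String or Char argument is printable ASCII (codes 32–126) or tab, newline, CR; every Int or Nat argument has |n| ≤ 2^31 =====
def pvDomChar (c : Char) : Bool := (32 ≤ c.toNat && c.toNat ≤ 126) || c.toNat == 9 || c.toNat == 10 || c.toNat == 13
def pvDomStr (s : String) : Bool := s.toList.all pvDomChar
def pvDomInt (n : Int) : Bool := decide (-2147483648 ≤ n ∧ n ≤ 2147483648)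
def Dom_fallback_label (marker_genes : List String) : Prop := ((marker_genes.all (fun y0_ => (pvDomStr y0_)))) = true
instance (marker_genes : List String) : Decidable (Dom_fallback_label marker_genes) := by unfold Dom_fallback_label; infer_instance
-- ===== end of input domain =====

set_option maxRecDepth 8192


-- B replaces A's six per-label set intersections by one inverted index (gene -> label) built
-- once, counting labels in a single pass over the unique genes (objective: alternative/idiomatic).

-- ===== PORT A =====
-- the six marker gene set literals, in source order
def pvM1 : List String := ["CD3D", "CD3E", "CD3G", "TRAC", "IL7R", "NKG7", "GNLY", "KLRD1"]
def pvM2 : List String := ["LYZ", "CD68", "C1QA", "C1QB", "LST1", "S100A8", "S100A9"]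
def pvM3 : List String := ["MS4A1", "CD79A", "CD79B", "MZB1", "JCHAIN", "IGHG1"]
def pvM4 : List String := ["ALB", "APOA1", "APOA2", "TTR", "HP", "AFP", "GPC3", "KRT8"]
def pvM5 : List String := ["PECAM1", "VWF", "KDR", "CDH5", "ENG", "PLVAP"]
def pvM6 : List String := ["COL1A1", "COL1A2", "COL3A1", "DCN", "LUM", "ACTA2", "RGS5"]

-- MARKER_FALLBACK: dict label -> set of genes (assoc list; each value a PySem.Set)
def MARKER_FALLBACK : List (String × PySem.Set String) :=
  [("T/NK", PySem.Set.ofList pvM1), ("Myeloid", PySem.Set.ofList pvM2),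
   ("B", PySem.Set.ofList pvM3), ("Hepatocyte", PySem.Set.ofList pvM4),
   ("Endothelial", PySem.Set.ofList pvM5), ("Fibroblast", PySem.Set.ofList pvM6)]

def fallback_label (marker_genes : List String) : String :=
  -- genes = {g.upper() for g in marker_genes[:50]}
  let genes : PySem.Set String :=
    PySem.Set.ofList ((PySem.List.slice marker_genes none (some 50)).map (fun g => PySem.Str.upper g))
  -- scores = {label: len(genes & markers) for label, markers in MARKER_FALLBACK.items()}
  let scores : List (String × Int) :=
    MARKER_FALLBACK.map (fun lm => (lm.1, PySem.Set.len (PySem.Set.inter genes lm.2)))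
  -- best_label, best_score = max(scores.items(), key=lambda item: item[1])
  match PySem.List.max? scores (fun it => it.2) with
  | some best => if best.2 ≥ 2 then best.1 else "Unknown"
  | none => "Unknown"  -- unreachable: scores has six entries

-- ===== PORT B =====
-- _GENE_TO_LABEL = {} ; for label, markers in MARKER_FALLBACK.items(): for g in markers: _GENE_TO_LABEL[g] = label
def GENE_TO_LABEL : PySem.Dict String String :=
  MARKER_FALLBACK.foldl (fun d lm => lm.2.foldl (fun d g => d.insert g lm.1) d) PySem.Dict.empty

-- loop body: label = _GENE_TO_LABEL.get(g); if label is not None: counts[label] += 1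
def bStep (c : PySem.Dict String Int) (g : String) : PySem.Dict String Int :=
  match PySem.Dict.get? GENE_TO_LABEL g with
  | some l => c.modify l 0 (· + 1)
  | none => c

def fallback_label_alt (marker_genes : List String) : String :=
  -- unique = list(dict.fromkeys(g.upper() for g in marker_genes[:50]))
  let unique : List String :=
    PySem.List.dedup ((PySem.List.slice marker_genes none (some 50)).map (fun g => PySem.Str.upper g))
  -- counts = {label: 0 for label in MARKER_FALLBACK}
  let counts0 : PySem.Dict String Int :=
    PySem.Dict.ofList (MARKER_FALLBACK.map (fun lm => (lm.1, (0 : Int))))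
  -- for g in unique: <bStep>
  let counts := unique.foldl bStep counts0
  -- best_label, best = "Unknown", -1 ; for label, c in counts.items(): if c > best: best_label, best = label, c
  let best := counts.items.foldl
      (fun (acc : String × Int) lc => if lc.2 > acc.2 then lc else acc) ("Unknown", -1)
  if best.2 ≥ 2 then best.1 else "Unknown"

-- ===== PRECONDITION & SPEC =====
def Spec_fallback_label (marker_genes : List String) (out : String) : Prop := out = fallback_label_alt marker_genes
instance (marker_genes : List String) (out : String) : Decidable (Spec_fallback_label marker_genes out) := by unfold Spec_fallback_label; infer_instance

-- ===== CLAIM (what is proved, stated in full; the proofs are below) =====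
def Claim_equal_fallback_label : Prop := ∀ (marker_genes : List String), Dom_fallback_label marker_genes → Spec_fallback_label marker_genes (fallback_label marker_genes)

-- ===== LEMMAS AND PROOFS =====

-- the value _GENE_TO_LABEL.get(g) as a chain of membership tests
def lblOf (g : String) : Option String :=
  if g ∈ pvM1 then some "T/NK" else if g ∈ pvM2 then some "Myeloid"
  else if g ∈ pvM3 then some "B" else if g ∈ pvM4 then some "Hepatocyte"
  else if g ∈ pvM5 then some "Endothelial" else if g ∈ pvM6 then some "Fibroblast" else none

lemma lookup_eq (g : String) : PySem.Dict.get? GENE_TO_LABEL g = lblOf g := by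
  unfold lblOf
  split_ifs with h1 h2 h3 h4 h5 h6
  · fin_cases h1 <;> decide
  · fin_cases h2 <;> decide
  · fin_cases h3 <;> decide
  · fin_cases h4 <;> decide
  · fin_cases h5 <;> decide
  · fin_cases h6 <;> decide
  · rw [PySem.Dict.get?_eq_none_iff_not_mem_keys]
    have hk : GENE_TO_LABEL.keys = pvM1 ++ pvM2 ++ pvM3 ++ pvM4 ++ pvM5 ++ pvM6 := by decide
    rw [hk]
    simp only [List.mem_append]
    tauto

-- the marker lists are pairwise disjoint
lemma disj1 (g : String) (h : g ∈ pvM1) : g ∉ pvM2 ∧ g ∉ pvM3 ∧ g ∉ pvM4 ∧ g ∉ pvM5 ∧ g ∉ pvM6 := by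
  fin_cases h <;> exact ⟨by decide, by decide, by decide, by decide, by decide⟩
lemma disj2 (g : String) (h : g ∈ pvM2) : g ∉ pvM1 ∧ g ∉ pvM3 ∧ g ∉ pvM4 ∧ g ∉ pvM5 ∧ g ∉ pvM6 := by
  fin_cases h <;> exact ⟨by decide, by decide, by decide, by decide, by decide⟩
lemma disj3 (g : String) (h : g ∈ pvM3) : g ∉ pvM1 ∧ g ∉ pvM2 ∧ g ∉ pvM4 ∧ g ∉ pvM5 ∧ g ∉ pvM6 := by
  fin_cases h <;> exact ⟨by decide, by decide, by decide, by decide, by decide⟩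
lemma disj4 (g : String) (h : g ∈ pvM4) : g ∉ pvM1 ∧ g ∉ pvM2 ∧ g ∉ pvM3 ∧ g ∉ pvM5 ∧ g ∉ pvM6 := by
  fin_cases h <;> exact ⟨by decide, by decide, by decide, by decide, by decide⟩
lemma disj5 (g : String) (h : g ∈ pvM5) : g ∉ pvM1 ∧ g ∉ pvM2 ∧ g ∉ pvM3 ∧ g ∉ pvM4 ∧ g ∉ pvM6 := by
  fin_cases h <;> exact ⟨by decide, by decide, by decide, by decide, by decide⟩
lemma disj6 (g : String) (h : g ∈ pvM6) : g ∉ pvM1 ∧ g ∉ pvM2 ∧ g ∉ pvM3 ∧ g ∉ pvM4 ∧ g ∉ pvM5 := by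
  fin_cases h <;> exact ⟨by decide, by decide, by decide, by decide, by decide⟩

-- per-label count over a gene list
def cnt (M : List String) (U : List String) : Int := (U.countP (fun g => decide (g ∈ M)) : Int)

lemma counts_fold (U : List String) (a1 a2 a3 a4 a5 a6 : Int) :
    U.foldl bStep
      (PySem.Dict.mk [("T/NK", a1), ("Myeloid", a2), ("B", a3),
                      ("Hepatocyte", a4), ("Endothelial", a5), ("Fibroblast", a6)])
    = PySem.Dict.mk [("T/NK", a1 + cnt pvM1 U), ("Myeloid", a2 + cnt pvM2 U),
                     ("B", a3 + cnt pvM3 U), ("Hepatocyte", a4 + cnt pvM4 U),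
                     ("Endothelial", a5 + cnt pvM5 U), ("Fibroblast", a6 + cnt pvM6 U)] := by
  induction U generalizing a1 a2 a3 a4 a5 a6 with
  | nil => simp [cnt]
  | cons g U ih =>
    rw [List.foldl_cons]
    by_cases h1 : g ∈ pvM1
    · obtain ⟨n2, n3, n4, n5, n6⟩ := disj1 g h1
      have hs : bStep (PySem.Dict.mk [("T/NK", a1), ("Myeloid", a2), ("B", a3), ("Hepatocyte", a4), ("Endothelial", a5), ("Fibroblast", a6)]) g
          = PySem.Dict.mk [("T/NK", a1 + 1), ("Myeloid", a2), ("B", a3), ("Hepatocyte", a4), ("Endothelial", a5), ("Fibroblast", a6)] := by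
        unfold bStep; rw [lookup_eq g]; unfold lblOf; rw [if_pos h1]; rfl
      rw [hs, ih]
      simp [cnt, h1, n2, n3, n4, n5, n6]
      omega
    by_cases h2 : g ∈ pvM2
    · obtain ⟨n1, n3, n4, n5, n6⟩ := disj2 g h2
      have hs : bStep (PySem.Dict.mk [("T/NK", a1), ("Myeloid", a2), ("B", a3), ("Hepatocyte", a4), ("Endothelial", a5), ("Fibroblast", a6)]) g
          = PySem.Dict.mk [("T/NK", a1), ("Myeloid", a2 + 1), ("B", a3), ("Hepatocyte", a4), ("Endothelial", a5), ("Fibroblast", a6)] := by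
        unfold bStep; rw [lookup_eq g]; unfold lblOf; rw [if_neg h1, if_pos h2]; rfl
      rw [hs, ih]
      simp [cnt, h2, n1, n3, n4, n5, n6]
      omega
    by_cases h3 : g ∈ pvM3
    · obtain ⟨n1, n2, n4, n5, n6⟩ := disj3 g h3
      have hs : bStep (PySem.Dict.mk [("T/NK", a1), ("Myeloid", a2), ("B", a3), ("Hepatocyte", a4), ("Endothelial", a5), ("Fibroblast", a6)]) g
          = PySem.Dict.mk [("T/NK", a1), ("Myeloid", a2), ("B", a3 + 1), ("Hepatocyte", a4), ("Endothelial", a5), ("Fibroblast", a6)] := by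
        unfold bStep; rw [lookup_eq g]; unfold lblOf; rw [if_neg h1, if_neg h2, if_pos h3]; rfl
      rw [hs, ih]
      simp [cnt, h3, n1, n2, n4, n5, n6]
      omega
    by_cases h4 : g ∈ pvM4
    · obtain ⟨n1, n2, n3, n5, n6⟩ := disj4 g h4
      have hs : bStep (PySem.Dict.mk [("T/NK", a1), ("Myeloid", a2), ("B", a3), ("Hepatocyte", a4), ("Endothelial", a5), ("Fibroblast", a6)]) g
          = PySem.Dict.mk [("T/NK", a1), ("Myeloid", a2), ("B", a3), ("Hepatocyte", a4 + 1), ("Endothelial", a5), ("Fibroblast", a6)] := by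
        unfold bStep; rw [lookup_eq g]; unfold lblOf; rw [if_neg h1, if_neg h2, if_neg h3, if_pos h4]; rfl
      rw [hs, ih]
      simp [cnt, h4, n1, n2, n3, n5, n6]
      omega
    by_cases h5 : g ∈ pvM5
    · obtain ⟨n1, n2, n3, n4, n6⟩ := disj5 g h5
      have hs : bStep (PySem.Dict.mk [("T/NK", a1), ("Myeloid", a2), ("B", a3), ("Hepatocyte", a4), ("Endothelial", a5), ("Fibroblast", a6)]) g
          = PySem.Dict.mk [("T/NK", a1), ("Myeloid", a2), ("B", a3), ("Hepatocyte", a4), ("Endothelial", a5 + 1), ("Fibroblast", a6)] := by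
        unfold bStep; rw [lookup_eq g]; unfold lblOf; rw [if_neg h1, if_neg h2, if_neg h3, if_neg h4, if_pos h5]; rfl
      rw [hs, ih]
      simp [cnt, h5, n1, n2, n3, n4, n6]
      omega
    by_cases h6 : g ∈ pvM6
    · obtain ⟨n1, n2, n3, n4, n5⟩ := disj6 g h6
      have hs : bStep (PySem.Dict.mk [("T/NK", a1), ("Myeloid", a2), ("B", a3), ("Hepatocyte", a4), ("Endothelial", a5), ("Fibroblast", a6)]) g
          = PySem.Dict.mk [("T/NK", a1), ("Myeloid", a2), ("B", a3), ("Hepatocyte", a4), ("Endothelial", a5), ("Fibroblast", a6 + 1)] := by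
        unfold bStep; rw [lookup_eq g]; unfold lblOf; rw [if_neg h1, if_neg h2, if_neg h3, if_neg h4, if_neg h5, if_pos h6]; rfl
      rw [hs, ih]
      simp [cnt, h6, n1, n2, n3, n4, n5]
      omega
    have hs : bStep (PySem.Dict.mk [("T/NK", a1), ("Myeloid", a2), ("B", a3), ("Hepatocyte", a4), ("Endothelial", a5), ("Fibroblast", a6)]) g = PySem.Dict.mk [("T/NK", a1), ("Myeloid", a2), ("B", a3), ("Hepatocyte", a4), ("Endothelial", a5), ("Fibroblast", a6)] := by
      unfold bStep; rw [lookup_eq g]; unfold lblOf; rw [if_neg h1, if_neg h2, if_neg h3, if_neg h4, if_neg h5, if_neg h6]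
    rw [hs, ih]
    simp [cnt, h1, h2, h3, h4, h5, h6]



set_option maxHeartbeats 2000000 in
lemma sel (c1 c2 c3 c4 c5 c6 : Int) (h1 : 0 ≤ c1) :
    (match PySem.List.max? [("T/NK", c1), ("Myeloid", c2), ("B", c3), ("Hepatocyte", c4),
        ("Endothelial", c5), ("Fibroblast", c6)] (fun it => it.2) with
     | some best => if best.2 ≥ 2 then best.1 else "Unknown"
     | none => "Unknown")
    = (let best := ([("T/NK", c1), ("Myeloid", c2), ("B", c3), ("Hepatocyte", c4),
          ("Endothelial", c5), ("Fibroblast", c6)] : List (String × Int)).foldl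
          (fun acc lc => if lc.2 > acc.2 then lc else acc) ("Unknown", -1)
       if best.2 ≥ 2 then best.1 else "Unknown") := by
  simp only [PySem.List.max?, List.foldl_cons, List.foldl_nil, gt_iff_lt]
  split_ifs <;> first | rfl | omega | simp [*]


lemma len_inter (U M : List String) :
    PySem.Set.len (PySem.Set.inter U (PySem.Set.ofList M)) = cnt M U := by
  simp only [PySem.Set.len, PySem.Set.inter, PySem.Set.contains, cnt,
    List.countP_eq_length_filter]
  congr 2
  apply List.filter_congr
  intro g hg
  simp [PySem.Set.mem_ofList]

lemma cnt_nonneg (M U : List String) : 0 ≤ cnt M U := Int.natCast_nonneg _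

-- ===== VERDICT (by name: the statement is the Claim_ definition above) =====
theorem fallback_label_spec : Claim_equal_fallback_label := by
  intro mg _
  unfold Spec_fallback_label fallback_label fallback_label_alt
  rw [PySem.List.dedup_eq_ofList]
  simp only [MARKER_FALLBACK, List.map_cons, List.map_nil, len_inter]
  rw [show (PySem.Dict.ofList ([("T/NK", (0:Int)), ("Myeloid", 0), ("B", 0),
      ("Hepatocyte", 0), ("Endothelial", 0), ("Fibroblast", 0)])) = PySem.Dict.mk
      [("T/NK", (0:Int)), ("Myeloid", 0), ("B", 0),
      ("Hepatocyte", 0), ("Endothelial", 0), ("Fibroblast", 0)] from rfl]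
  rw [counts_fold]
  simp only [zero_add]
  exact sel _ _ _ _ _ _ (cnt_nonneg _ _)
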